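-- pv_equiv track=rewrite | github.com/VRAXION/VRAXION | instnct/recipes/train_framed_sort.py | generate_corpus
-- ===== SOURCE A (Python) =====
-- def generate_corpus(n_pad):
--     """Generate 3-digit sorting corpus with frame tokens."""
--     examples = []
--     for a in range(10):
--         for b in range(10):
--             for c in range(10):
--                 digits = [a, b, c]
--                 inp = ''.join(str(x) for x in digits)
--                 out = ''.join(str(x) for x in sorted(digits))
--                 pad = '.' * n_pad
--                 examples.append(f"[{inp}]{pad}{{{out}}}\n")
--     return examples
-- ===== SOURCE B (Python) =====
-- def generate_corpus(n_pad):
--     """Generate 3-digit sorting corpus with frame tokens."""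
--     examples = []
--     pad = '.' * n_pad
--     for n in range(1000):
--         a, b, c = n // 100, n // 10 % 10, n % 10
--         lo = min(min(a, b), c)
--         hi = max(max(a, b), c)
--         mid = a + b + c - lo - hi
--         examples.append(f"[{a}{b}{c}]{pad}{{{lo}{mid}{hi}}}\n")
--     return examples
-- ===== Notes on version B (the rewrite author's own statement) =====
-- stated objective: alternative
-- what changed: Replaces the three nested digit loops and the per-element sorted() call with a single loop over range(1000) that extracts the digits arithmetically (n//100, n//10%10, n%10) and orders them by min/max/sum arithmetic (mid = a+b+c-lo-hi) instead of sorting, with the pad string hoisted out of the loop.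
import Mathlib
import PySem

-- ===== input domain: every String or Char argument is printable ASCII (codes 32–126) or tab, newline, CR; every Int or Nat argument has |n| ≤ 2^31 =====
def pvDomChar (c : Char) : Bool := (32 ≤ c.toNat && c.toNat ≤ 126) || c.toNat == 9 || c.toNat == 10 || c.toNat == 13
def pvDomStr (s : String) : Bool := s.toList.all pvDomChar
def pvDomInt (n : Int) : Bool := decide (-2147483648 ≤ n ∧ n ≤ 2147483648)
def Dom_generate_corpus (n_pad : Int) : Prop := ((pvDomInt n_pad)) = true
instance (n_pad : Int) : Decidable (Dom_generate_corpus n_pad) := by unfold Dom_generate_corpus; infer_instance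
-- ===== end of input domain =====

-- B flattens A's three nested digit loops into one loop over 0..999, extracting digits
-- arithmetically and ordering them by min/max/sum arithmetic instead of sorted() (objective: alternative).


-- ===== PORT A =====
-- Literal port of A: three nested `for _ in range(10)` loops appending one framed example each.
-- '.' * n_pad (str * int) is ported as pyRepeat on the character list (exact: empty for n_pad ≤ 0).
def generate_corpus (n_pad : Int) : List String :=
  (PySem.List.pyRange 0 10 1).foldl (fun examples a =>
    (PySem.List.pyRange 0 10 1).foldl (fun examples b =>
      (PySem.List.pyRange 0 10 1).foldl (fun examples c =>
        let digits : List Int := [a, b, c]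
        let inp := PySem.Str.join "" (digits.map (fun x => PySem.Int.toStr x))
        let out := PySem.Str.join "" ((PySem.List.sorted digits (fun x => x) false).map (fun x => PySem.Int.toStr x))
        let pad := String.ofList (PySem.List.pyRepeat ['.'] n_pad)
        examples ++ ["[" ++ inp ++ "]" ++ pad ++ ("{" ++ out ++ "}\n")]) examples) examples) []

-- ===== PORT B =====
-- Literal port of B: one loop over range(1000), digits by // and %, order by min/max/sum;
-- each f-string interpolation of an int is PySem.Int.toStr; pad computed once before the loop.
def generate_corpus_alt (n_pad : Int) : List String :=
  let pad := String.ofList (PySem.List.pyRepeat ['.'] n_pad)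
  (PySem.List.pyRange 0 1000 1).foldl (fun examples n =>
    let a := PySem.Int.floordiv n 100
    let b := PySem.Int.mod (PySem.Int.floordiv n 10) 10
    let c := PySem.Int.mod n 10
    let lo := min (min a b) c
    let hi := max (max a b) c
    let mid := a + b + c - lo - hi
    examples ++ ["[" ++ (PySem.Int.toStr a ++ PySem.Int.toStr b ++ PySem.Int.toStr c) ++ "]" ++ pad ++
      ("{" ++ (PySem.Int.toStr lo ++ PySem.Int.toStr mid ++ PySem.Int.toStr hi) ++ "}\n")]) []

-- ===== PRECONDITION & SPEC =====
def Spec_generate_corpus (n_pad : Int) (out : List String) : Prop := out = generate_corpus_alt n_pad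
instance (n_pad : Int) (out : List String) : Decidable (Spec_generate_corpus n_pad out) := by unfold Spec_generate_corpus; infer_instance

-- ===== CLAIM (what is proved, stated in full; the proofs are below) =====
def Claim_equal_generate_corpus : Prop := ∀ (n_pad : Int), Dom_generate_corpus n_pad → Spec_generate_corpus n_pad (generate_corpus n_pad)

-- ===== LEMMAS AND PROOFS =====
-- ''.join([x, y, z]) is plain concatenation.
theorem pvJoin3 (x y z : String) : PySem.Str.join "" [x, y, z] = x ++ y ++ z := by
  apply String.ext
  rw [PySem.Str.toList_join]
  simp [PySem.Chars.join, List.intercalate, List.intersperse]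

-- range(0, 1000) enumerated as hundreds/tens/units digits.
set_option maxRecDepth 20000 in
theorem pvRange1000 :
    PySem.List.pyRange 0 1000 1 =
      (PySem.List.pyRange 0 10 1).flatMap (fun a =>
        (PySem.List.pyRange 0 10 1).flatMap (fun b =>
          (PySem.List.pyRange 0 10 1).map (fun c => 100 * a + 10 * b + c))) := by
  decide

-- For digits a b c and n = 100a + 10b + c: digit extraction and the min/mid/max order.
set_option maxRecDepth 20000 in
theorem pvDigits :
    ∀ a ∈ PySem.List.pyRange 0 10 1, ∀ b ∈ PySem.List.pyRange 0 10 1, ∀ c ∈ PySem.List.pyRange 0 10 1,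
      PySem.Int.floordiv (100 * a + 10 * b + c) 100 = a ∧
      PySem.Int.mod (PySem.Int.floordiv (100 * a + 10 * b + c) 10) 10 = b ∧
      PySem.Int.mod (100 * a + 10 * b + c) 10 = c ∧
      PySem.List.sorted [a, b, c] (fun x => x) false =
        [min (min a b) c, a + b + c - min (min a b) c - max (max a b) c, max (max a b) c] := by
  decide

theorem pvFlatMap_congr {α β : Type} (l : List α) (f g : α → List β)
    (h : ∀ x ∈ l, f x = g x) : l.flatMap f = l.flatMap g := by
  induction l with
  | nil => rfl
  | cons x xs ih =>
    simp only [List.flatMap_cons]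
    rw [h x (by simp), ih (fun y hy => h y (by simp [hy]))]

-- ===== VERDICT (by name: the statement is the Claim_ definition above) =====
theorem generate_corpus_spec : Claim_equal_generate_corpus := by
  intro n_pad _
  unfold Spec_generate_corpus generate_corpus generate_corpus_alt
  simp only [PySem.List.foldl_append_singleton_eq_map, PySem.List.foldl_append_eq_flatMap,
    List.nil_append]
  rw [pvRange1000, List.map_flatMap]
  apply pvFlatMap_congr
  intro a ha
  rw [List.map_flatMap]
  apply pvFlatMap_congr
  intro b hb
  rw [List.map_map]
  apply List.map_congr_left
  intro c hc
  obtain ⟨h1, h2, h3, h4⟩ := pvDigits a ha b hb c hc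
  simp only [Function.comp_apply, h1, h2, h3, h4, List.map_cons, List.map_nil, pvJoin3]
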